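-- pv_equiv track=rewrite | github.com/PowerLichen/CodeTest | Programmers-py/150367.py | solution
-- ===== SOURCE A (Python) =====
-- def is_bintree(b_num, start, end, is_zero):
--     if start > end:
--         return 1
--
--     mid = (start + end) // 2
--     if is_zero and (b_num[mid] == "1"):
--         return 0
--
--     if b_num[mid] == "0":
--         is_zero = True
--
--     check_left = is_bintree(b_num, start, mid-1, is_zero)
--     check_right = is_bintree(b_num, mid+1, end, is_zero)
--     return check_left & check_right
--
-- def solution(numbers):
--     result = []
--     for num in numbers:
--         b_num = str(bin(num))[2:]
--         length = len(b_num)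
--
--         depth = 1
--         while length > 2**depth - 1:
--             depth += 1
--
--         b_num = "0"*(2**depth - 1 - length) + b_num
--         answer = is_bintree(b_num, 0, len(b_num)-1, False)
--         result.append(answer)
--
--     return result
-- ===== SOURCE B (Python) =====
-- def solution(numbers):
--     result = []
--     for num in numbers:
--         b_num = bin(num)[2:]
--         length = len(b_num)
--
--         depth = 1
--         while length > 2 ** depth - 1:
--             depth += 1
--
--         b_num = "0" * (2 ** depth - 1 - length) + b_num
--         ok = 1
--         stack = [(0, len(b_num) - 1, False)]
--         while stack:
--             s, e, z = stack.pop()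
--             if s > e:
--                 continue
--             mid = (s + e) // 2
--             c = b_num[mid]
--             if z and c == "1":
--                 ok = 0
--                 continue
--             if c == "0":
--                 z = True
--             stack.append((s, mid - 1, z))
--             stack.append((mid + 1, e, z))
--         result.append(ok)
--     return result
-- ===== Notes on version B (the rewrite author's own statement) =====
-- stated objective: alternative
-- what changed: A's doubly-recursive is_bintree over (start, end, is_zero) subtrees is replaced by a flat explicit work-list loop over pending segments with an ok flag (same bin/padding setup, same values).
import Mathlib
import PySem

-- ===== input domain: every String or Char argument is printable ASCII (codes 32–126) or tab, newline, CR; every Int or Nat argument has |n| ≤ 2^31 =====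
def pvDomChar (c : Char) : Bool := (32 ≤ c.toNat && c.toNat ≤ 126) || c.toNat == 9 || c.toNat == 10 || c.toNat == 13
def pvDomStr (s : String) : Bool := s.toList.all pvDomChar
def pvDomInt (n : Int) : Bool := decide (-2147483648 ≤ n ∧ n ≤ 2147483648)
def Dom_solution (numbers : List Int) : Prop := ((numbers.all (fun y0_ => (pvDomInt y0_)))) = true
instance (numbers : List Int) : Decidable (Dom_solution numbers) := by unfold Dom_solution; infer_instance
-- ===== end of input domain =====

-- B replaces A's doubly-recursive is_bintree by a flat work-list loop over (start, end, is_zero)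
-- segments with an ok flag; same return value, different decomposition (objective: alternative).
-- (Recursions/loops are ported with an explicit fuel that provably exceeds the number of steps —
-- a totality guard only, it never changes the computed value.)

-- shared setup, identical lines in both Pythons: the 'while length > 2**depth - 1' loop
-- (fuel `length` suffices: the loop runs at most length-1 times, since depth ≤ 2^depth - 1)
def depthGo (length : Nat) : Nat → Nat → Nat
  | 0, depth => depth
  | fuel + 1, depth => if length > 2 ^ depth - 1 then depthGo length fuel (depth + 1) else depth

-- … and b_num = bin(num)[2:] zero-padded to length 2^depth - 1, as a list of characters
def prep (num : Int) : List Char :=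
  let b := PySem.List.slice (PySem.Int.toBinChars0b num) (some 2) none
  let depth := depthGo b.length b.length 1
  List.replicate (2 ^ depth - 1 - b.length) '0' ++ b

-- ===== PORT A =====
-- is_bintree's recursion, on fuel ≥ segment size (each call strictly shrinks the segment)
def isBinGo (b_num : List Char) : Nat → Int → Int → Bool → Int
  | 0, _, _, _ => 1
  | fuel + 1, start, stop, is_zero =>
    if start > stop then 1
    else
      let mid := PySem.Int.floordiv (start + stop) 2
      if is_zero ∧ PySem.List.pyGet? b_num mid = some '1' then 0
      else
        let is_zero' := if PySem.List.pyGet? b_num mid = some '0' then true else is_zero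
        (isBinGo b_num fuel start (mid - 1) is_zero').land (isBinGo b_num fuel (mid + 1) stop is_zero')

def is_bintree (b_num : List Char) (start : Int) (stop : Int) (is_zero : Bool) : Int :=
  isBinGo b_num (stop - start + 1).toNat start stop is_zero

def solution (numbers : List Int) : List Int :=
  numbers.foldl (fun result num =>
    let b_num := prep num
    result ++ [is_bintree b_num 0 ((b_num.length : Int) - 1) false]) []

-- ===== PORT B =====
-- the work-list loop, on fuel ≥ total weight of the stack (each iteration spends ≥ 1 weight)
def stackGo (b_num : List Char) : Nat → List (Int × Int × Bool) → Int → Int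
  | _, [], ok => ok
  | 0, _ :: _, ok => ok
  | fuel + 1, (s, e, z) :: st, ok =>
    if s > e then stackGo b_num fuel st ok
    else
      let mid := PySem.Int.floordiv (s + e) 2
      if z ∧ PySem.List.pyGet? b_num mid = some '1' then stackGo b_num fuel st 0
      else
        let z' := if PySem.List.pyGet? b_num mid = some '0' then true else z
        stackGo b_num fuel ((mid + 1, e, z') :: (s, mid - 1, z') :: st) ok

def solution_alt (numbers : List Int) : List Int :=
  numbers.foldl (fun result num =>
    let b_num := prep num
    result ++ [stackGo b_num (2 * b_num.length + 1) [(0, (b_num.length : Int) - 1, false)] 1]) []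

-- ===== PRECONDITION & SPEC =====
def Spec_solution (numbers : List Int) (out : List Int) : Prop := out = solution_alt numbers
instance (numbers : List Int) (out : List Int) : Decidable (Spec_solution numbers out) := by unfold Spec_solution; infer_instance

-- ===== CLAIM (what is proved, stated in full; the proofs are below) =====
def Claim_equal_solution : Prop := ∀ (numbers : List Int), Dom_solution numbers → Spec_solution numbers (solution numbers)

-- ===== LEMMAS AND PROOFS =====

lemma isBinGo_zero_or_one (b : List Char) :
    ∀ (f : Nat) (s e : Int) (z : Bool), isBinGo b f s e z = 0 ∨ isBinGo b f s e z = 1 := by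
  intro f
  induction f with
  | zero => intro s e z; right; rfl
  | succ n ih =>
    intro s e z
    simp only [isBinGo]
    by_cases hse : s > e
    · rw [if_pos hse]; right; rfl
    · rw [if_neg hse]
      by_cases hz : z = true ∧ PySem.List.pyGet? b (PySem.Int.floordiv (s + e) 2) = some '1'
      · rw [if_pos hz]; left; rfl
      · rw [if_neg hz]
        rcases ih s (PySem.Int.floordiv (s + e) 2 - 1)
            (if PySem.List.pyGet? b (PySem.Int.floordiv (s + e) 2) = some '0' then true else z) with hl | hl <;>
          rcases ih (PySem.Int.floordiv (s + e) 2 + 1) e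
              (if PySem.List.pyGet? b (PySem.Int.floordiv (s + e) 2) = some '0' then true else z) with hr | hr <;>
            rw [hl, hr] <;> decide

lemma isBinGo_mono (b : List Char) : ∀ (f₁ f₂ : Nat) (s e : Int) (z : Bool),
    (e - s + 1).toNat ≤ f₁ → (e - s + 1).toNat ≤ f₂ →
    isBinGo b f₁ s e z = isBinGo b f₂ s e z := by
  intro f₁
  induction f₁ with
  | zero =>
    intro f₂ s e z h1 _
    have hse : s > e := by omega
    cases f₂ with
    | zero => rfl
    | succ m => rw [isBinGo, isBinGo, if_pos hse]
  | succ n ih =>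
    intro f₂ s e z h1 h2
    by_cases hse : s > e
    · cases f₂ with
      | zero => rw [isBinGo, isBinGo, if_pos hse]
      | succ m => rw [isBinGo, isBinGo, if_pos hse, if_pos hse]
    · have hm := PySem.Int.floordiv_two_mid_bounds (lo := s) (hi := e) (by omega)
      cases f₂ with
      | zero => omega
      | succ m =>
        rw [isBinGo, isBinGo]
        simp only [if_neg hse]
        rw [ih m s (PySem.Int.floordiv (s + e) 2 - 1) _ (by omega) (by omega),
            ih m (PySem.Int.floordiv (s + e) 2 + 1) e _ (by omega) (by omega)]

-- weight of a pending segment: an upper bound on the loop iterations it can still cause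
def segWeight (t : Int × Int × Bool) : Nat := 2 * (t.2.1 - t.1 + 1).toNat + 1

lemma stackGo_mono (b : List Char) : ∀ (f₁ f₂ : Nat) (st : List (Int × Int × Bool)) (ok : Int),
    (st.map segWeight).sum ≤ f₁ → (st.map segWeight).sum ≤ f₂ →
    stackGo b f₁ st ok = stackGo b f₂ st ok := by
  intro f₁
  induction f₁ with
  | zero =>
    intro f₂ st ok h1 _
    cases st with
    | nil => cases f₂ <;> rfl
    | cons hd tl =>
      exfalso
      obtain ⟨s, e, z⟩ := hd
      simp [segWeight] at h1
  | succ n ih =>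
    intro f₂ st ok h1 h2
    cases st with
    | nil => cases f₂ <;> rfl
    | cons hd tl =>
      obtain ⟨s, e, z⟩ := hd
      cases f₂ with
      | zero =>
        exfalso
        simp [segWeight] at h2
      | succ m =>
        simp only [List.map_cons, List.sum_cons, segWeight] at h1 h2
        rw [stackGo, stackGo]
        by_cases hse : s > e
        · simp only [if_pos hse]
          exact ih m tl ok (by omega) (by omega)
        · simp only [if_neg hse]
          have hm := PySem.Int.floordiv_two_mid_bounds (lo := s) (hi := e) (by omega)
          by_cases hz : z = true ∧ PySem.List.pyGet? b (PySem.Int.floordiv (s + e) 2) = some '1'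
          · simp only [if_pos hz]
            exact ih m tl 0 (by omega) (by omega)
          · simp only [if_neg hz]
            refine ih m _ ok ?_ ?_ <;>
              simp only [List.map_cons, List.sum_cons, segWeight] <;> omega

lemma isBinGo_succ (b : List Char) (n : Nat) (s e : Int) (z : Bool) :
    isBinGo b (n + 1) s e z =
      if s > e then 1
      else if z = true ∧ PySem.List.pyGet? b (PySem.Int.floordiv (s + e) 2) = some '1' then 0
      else
        (isBinGo b n s (PySem.Int.floordiv (s + e) 2 - 1)
            (if PySem.List.pyGet? b (PySem.Int.floordiv (s + e) 2) = some '0' then true else z)).land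
          (isBinGo b n (PySem.Int.floordiv (s + e) 2 + 1) e
            (if PySem.List.pyGet? b (PySem.Int.floordiv (s + e) 2) = some '0' then true else z)) := rfl

lemma land_if (L R ok : Int) (hL : L = 0 ∨ L = 1) (hR : R = 0 ∨ R = 1) :
    (if L = 1 then (if R = 1 then ok else 0) else 0) = (if L.land R = 1 then ok else 0) := by
  rcases hL with h | h <;> rcases hR with h2 | h2 <;> subst h <;> subst h2 <;> simp <;>
    intro hx <;> exact absurd hx (by decide)

lemma stackGo_cons (b : List Char) : ∀ (n : Nat) (s e : Int) (z : Bool),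
    (e - s + 1).toNat ≤ n → ∀ (st : List (Int × Int × Bool)) (ok : Int) (fuel : Nat),
    segWeight (s, e, z) + (st.map segWeight).sum ≤ fuel →
    stackGo b fuel ((s, e, z) :: st) ok =
      stackGo b fuel st (if is_bintree b s e z = 1 then ok else 0) := by
  intro n
  induction n with
  | zero =>
    intro s e z hn st ok fuel hf
    have hse : s > e := by omega
    have h1 : is_bintree b s e z = 1 := by
      unfold is_bintree
      have : (e - s + 1).toNat = 0 := by omega
      rw [this]; rfl
    rw [h1, if_pos rfl]
    cases fuel with
    | zero => exfalso; simp [segWeight] at hf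
    | succ f =>
      rw [stackGo, if_pos hse]
      exact stackGo_mono b f (f + 1) st ok (by simp [segWeight] at hf; omega)
        (by simp [segWeight] at hf; omega)
  | succ n ih =>
    intro s e z hn st ok fuel hf
    by_cases hse : s > e
    · have h1 : is_bintree b s e z = 1 := by
        unfold is_bintree
        have : (e - s + 1).toNat = 0 := by omega
        rw [this]; rfl
      rw [h1, if_pos rfl]
      cases fuel with
      | zero => exfalso; simp [segWeight] at hf
      | succ f =>
        rw [stackGo, if_pos hse]
        exact stackGo_mono b f (f + 1) st ok (by simp [segWeight] at hf; omega)
          (by simp [segWeight] at hf; omega)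
    · have hm := PySem.Int.floordiv_two_mid_bounds (lo := s) (hi := e) (by omega)
      set mid := PySem.Int.floordiv (s + e) 2 with hmid
      have hk : (e - s + 1).toNat = (e - s).toNat + 1 := by omega
      have hbt : is_bintree b s e z = isBinGo b ((e - s).toNat + 1) s e z := by
        unfold is_bintree; rw [hk]
      cases fuel with
      | zero => exfalso; simp [segWeight] at hf
      | succ f =>
        have hfw : 2 * (e - s + 1).toNat + 1 + (st.map segWeight).sum ≤ f + 1 := by
          simpa [segWeight] using hf
        rw [stackGo]
        simp only [if_neg hse, ← hmid]
        by_cases hz : z = true ∧ PySem.List.pyGet? b mid = some '1'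
        · have h0 : is_bintree b s e z = 0 := by
            rw [hbt, isBinGo_succ, if_neg hse, ← hmid, if_pos hz]
          rw [if_pos hz, h0, if_neg (by decide)]
          exact stackGo_mono b f (f + 1) st 0 (by omega) (by omega)
        · rw [if_neg hz]
          set z' := if PySem.List.pyGet? b mid = some '0' then true else z with hz'
          have hL := ih s (mid - 1) z' (by omega)
          have hR := ih (mid + 1) e z' (by omega)
          rw [hR ((s, mid - 1, z') :: st) ok f
                (by simp only [List.map_cons, List.sum_cons, segWeight]; omega),
              hL st _ f (by simp only [segWeight]; omega)]
          have hrw : is_bintree b s e z =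
              (is_bintree b s (mid - 1) z').land (is_bintree b (mid + 1) e z') := by
            rw [hbt, isBinGo_succ, if_neg hse, ← hmid, if_neg hz, ← hz']
            unfold is_bintree
            rw [isBinGo_mono b ((e - s).toNat) ((mid - 1 - s + 1).toNat) s (mid - 1) z'
                  (by omega) (by omega),
                isBinGo_mono b ((e - s).toNat) ((e - (mid + 1) + 1).toNat) (mid + 1) e z'
                  (by omega) (by omega)]
          rw [stackGo_mono b f (f + 1) st _ (by omega) (by omega)]
          congr 1
          rw [hrw]
          exact land_if _ _ ok
            (isBinGo_zero_or_one b ((mid - 1 - s + 1).toNat) s (mid - 1) z')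
            (isBinGo_zero_or_one b ((e - (mid + 1) + 1).toNat) (mid + 1) e z')

lemma per_num (b : List Char) :
    stackGo b (2 * b.length + 1) [(0, (b.length : Int) - 1, false)] 1 =
      is_bintree b 0 ((b.length : Int) - 1) false := by
  rw [stackGo_cons b b.length 0 ((b.length : Int) - 1) false (by omega) [] 1
        (2 * b.length + 1) (by simp [segWeight])]
  have hnil : ∀ (f : Nat) (v : Int), stackGo b f [] v = v := by
    intro f v; cases f <;> rfl
  rcases isBinGo_zero_or_one b (((b.length : Int) - 1) - 0 + 1).toNat 0 ((b.length : Int) - 1) false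
      with h | h <;>
    rw [show is_bintree b 0 ((b.length : Int) - 1) false =
          isBinGo b (((b.length : Int) - 1) - 0 + 1).toNat 0 ((b.length : Int) - 1) false from rfl,
        h, hnil] <;> simp

lemma foldl_eq (numbers : List Int) : ∀ acc : List Int,
    numbers.foldl (fun result num =>
      let b_num := prep num
      result ++ [is_bintree b_num 0 ((b_num.length : Int) - 1) false]) acc =
    numbers.foldl (fun result num =>
      let b_num := prep num
      result ++ [stackGo b_num (2 * b_num.length + 1) [(0, (b_num.length : Int) - 1, false)] 1]) acc := by
  induction numbers with
  | nil => intro acc; rfl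
  | cons n ns ih =>
    intro acc
    simp only [List.foldl_cons]
    rw [per_num, ih]

-- ===== VERDICT (by name: the statement is the Claim_ definition above) =====
theorem solution_spec : Claim_equal_solution := by
  intro numbers _
  unfold Spec_solution solution solution_alt
  exact foldl_eq numbers []
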